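-- pv_equiv track=rewrite | github.com/SajjadPSavoji/Ngram_Language_Model | codes/utils.py | char_tokenizer
-- ===== SOURCE A (Python) =====
-- def char_tokenizer(tweet):
--     specials = ['<', '>', 's', '/']
--     tokenized = []
--     for i, char in enumerate(tweet):
--         if char in specials:
--             if char == specials[0]:
--                 if tweet[i:i+3] == "<s>":
--                     tokenized.append('<s>')
--                     continue
--                 elif tweet[i:i+4] == "</s>":
--                     tokenized.append('</s>')
--                     continue
--             else: continue
--         tokenized.append(char)
--     return tokenized
-- ===== SOURCE B (Python) =====
-- def char_tokenizer(tweet):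
--     # Token-consuming scanner: recognize '<s>'/'</s>' and advance past them,
--     # otherwise keep the char unless it is one of the dropped specials '>', 's', '/'.
--     out = []
--     i = 0
--     n = len(tweet)
--     while i < n:
--         if tweet.startswith('<s>', i):
--             out.append('<s>')
--             i += 3
--         elif tweet.startswith('</s>', i):
--             out.append('</s>')
--             i += 4
--         else:
--             c = tweet[i]
--             if c not in '>s/':
--                 out.append(c)
--             i += 1
--     return out
-- ===== Notes on version B (the rewrite author's own statement) =====
-- stated objective: alternative
-- what changed: Replaces the per-index loop (which re-checks slices at every position and relies on dropping leftover 's'/'>'/'/' chars) with a token-consuming scanner that advances past a matched '<s>'/'</s>' token and otherwise keeps or drops single characters.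
import Mathlib
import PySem

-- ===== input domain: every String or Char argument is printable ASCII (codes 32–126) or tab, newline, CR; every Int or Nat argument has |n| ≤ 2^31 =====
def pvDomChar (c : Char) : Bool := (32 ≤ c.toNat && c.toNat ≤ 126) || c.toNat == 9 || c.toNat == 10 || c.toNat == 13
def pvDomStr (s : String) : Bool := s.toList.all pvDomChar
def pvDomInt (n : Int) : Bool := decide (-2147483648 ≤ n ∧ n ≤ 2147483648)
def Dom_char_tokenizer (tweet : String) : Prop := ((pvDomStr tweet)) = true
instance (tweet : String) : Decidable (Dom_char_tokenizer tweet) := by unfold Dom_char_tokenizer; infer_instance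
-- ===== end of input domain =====

-- B replaces A's per-index loop (which relies on dropping leftover 's'/'>'/'/' characters)
-- with a token-consuming scanner; same cost, different structure (objective: alternative).

-- ===== PORT A =====
-- loop body of A's 'for i, char in enumerate(tweet)' (specials = ['<','>','s','/'], specials[0] = '<')
def tokStep (tweet : String) (tokenized : List String) (ic : Int × Char) : List String :=
  let i := ic.1
  let char := ic.2
  if char ∈ ['<', '>', 's', '/'] then
    if char = '<' then
      if PySem.Str.slice tweet (some i) (some (i + 3)) = "<s>" then tokenized ++ ["<s>"]
      else if PySem.Str.slice tweet (some i) (some (i + 4)) = "</s>" then tokenized ++ ["</s>"]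
      else tokenized ++ [char.toString]
    else tokenized
  else tokenized ++ [char.toString]

def char_tokenizer (tweet : String) : List String :=
  (PySem.List.enumerate tweet.toList 0).foldl (tokStep tweet) []

-- ===== PORT B =====
-- B's while-loop scanner: match '<s>' / '</s>' at the front and consume it, else one char
def scanTok : List Char → List String
  | '<' :: 's' :: '>' :: rest => "<s>" :: scanTok rest
  | '<' :: '/' :: 's' :: '>' :: rest => "</s>" :: scanTok rest
  | c :: rest => if c = '>' ∨ c = 's' ∨ c = '/' then scanTok rest else c.toString :: scanTok rest
  | [] => []

def char_tokenizer_alt (tweet : String) : List String := scanTok tweet.toList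

-- ===== PRECONDITION & SPEC =====
def Spec_char_tokenizer (tweet : String) (out : List String) : Prop := out = char_tokenizer_alt tweet
instance (tweet : String) (out : List String) : Decidable (Spec_char_tokenizer tweet out) := by unfold Spec_char_tokenizer; infer_instance

-- ===== CLAIM (what is proved, stated in full; the proofs are below) =====
def Claim_equal_char_tokenizer : Prop := ∀ (tweet : String), Dom_char_tokenizer tweet → Spec_char_tokenizer tweet (char_tokenizer tweet)

-- ===== LEMMAS AND PROOFS =====

-- the slice tweet[i:i+n] at i = pre.length is the first n chars of the suffix cs
lemma slice_take (tweet : String) (pre cs : List Char) (h : tweet.toList = pre ++ cs) (n : Nat) :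
    (PySem.Str.slice tweet (some (pre.length : Int)) (some ((pre.length : Int) + (n : Int)))).toList
      = cs.take n := by
  rw [PySem.Str.toList_slice, PySem.Chars.slice_eq_listSlice, PySem.List.slice_natCast_add, h,
    List.drop_left]

lemma slice3_iff (tweet : String) (pre cs : List Char) (h : tweet.toList = pre ++ cs) :
    (PySem.Str.slice tweet (some (pre.length : Int)) (some ((pre.length : Int) + 3)) = "<s>")
      ↔ cs.take 3 = ['<', 's', '>'] := by
  have e : ((pre.length : Int) + 3) = ((pre.length : Int) + ((3 : Nat) : Int)) := by norm_num
  rw [e, ← String.toList_inj, slice_take tweet pre cs h 3]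
  exact Iff.rfl

lemma slice4_iff (tweet : String) (pre cs : List Char) (h : tweet.toList = pre ++ cs) :
    (PySem.Str.slice tweet (some (pre.length : Int)) (some ((pre.length : Int) + 4)) = "</s>")
      ↔ cs.take 4 = ['<', '/', 's', '>'] := by
  have e : ((pre.length : Int) + 4) = ((pre.length : Int) + ((4 : Nat) : Int)) := by norm_num
  rw [e, ← String.toList_inj, slice_take tweet pre cs h 4]
  exact Iff.rfl

lemma fold_eq_scan (tweet : String) (cs : List Char) :
    ∀ (pre : List Char) (acc : List String), tweet.toList = pre ++ cs →
      (PySem.List.enumerate cs (pre.length : Int)).foldl (tokStep tweet) acc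
        = acc ++ scanTok cs := by
  induction cs using scanTok.induct with
  | case1 rest ih =>
    intro pre acc h
    have h3 := (slice3_iff tweet pre _ h).mpr (by simp)
    have e : (pre.length : Int) + 1 + 1 + 1 = ((pre ++ ['<', 's', '>']).length : Int) := by
      simp; omega
    rw [PySem.List.enumerate_cons, PySem.List.enumerate_cons, PySem.List.enumerate_cons,
      List.foldl_cons, List.foldl_cons, List.foldl_cons, e,
      ih (pre ++ ['<', 's', '>']) _ (by simpa using h)]
    simp [tokStep, h3, scanTok]
  | case2 rest ih =>
    intro pre acc h
    have h3 : ¬ (PySem.Str.slice tweet (some (pre.length : Int))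
        (some ((pre.length : Int) + 3)) = "<s>") := by
      rw [slice3_iff tweet pre _ h]; simp
    have h4 := (slice4_iff tweet pre _ h).mpr (by simp)
    have e : (pre.length : Int) + 1 + 1 + 1 + 1 = ((pre ++ ['<', '/', 's', '>']).length : Int) := by
      simp; omega
    rw [PySem.List.enumerate_cons, PySem.List.enumerate_cons, PySem.List.enumerate_cons,
      PySem.List.enumerate_cons, List.foldl_cons, List.foldl_cons, List.foldl_cons,
      List.foldl_cons, e, ih (pre ++ ['<', '/', 's', '>']) _ (by simpa using h)]
    simp [tokStep, h3, h4, scanTok]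
  | case3 c rest hp1 hp2 hor ih =>
    intro pre acc h
    have e : (pre.length : Int) + 1 = ((pre ++ [c]).length : Int) := by simp
    rw [PySem.List.enumerate_cons, List.foldl_cons, e,
      ih (pre ++ [c]) _ (by simpa using h)]
    rcases hor with h2 | h2 | h2 <;> subst h2 <;> simp [tokStep, scanTok]
  | case4 c rest h1 h2 h3 ih =>
    intro pre acc h
    have e : (pre.length : Int) + 1 = ((pre ++ [c]).length : Int) := by simp
    have hs3 : ¬ (PySem.Str.slice tweet (some (pre.length : Int))
        (some ((pre.length : Int) + 3)) = "<s>") := by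
      rw [slice3_iff tweet pre _ h]
      intro hcq
      rcases rest with _ | ⟨a, _ | ⟨b, t⟩⟩
      · simp at hcq
      · simp at hcq
      · simp at hcq
        exact h1 t hcq.1 (by simp [hcq.2.1, hcq.2.2])
    have hs4 : ¬ (PySem.Str.slice tweet (some (pre.length : Int))
        (some ((pre.length : Int) + 4)) = "</s>") := by
      rw [slice4_iff tweet pre _ h]
      intro hcq
      rcases rest with _ | ⟨a, _ | ⟨b, _ | ⟨d, t⟩⟩⟩
      · simp at hcq
      · simp at hcq
      · simp at hcq
      · simp at hcq
        exact h2 t hcq.1 (by simp [hcq.2.1, hcq.2.2.1, hcq.2.2.2])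
    rw [PySem.List.enumerate_cons, List.foldl_cons, e, ih (pre ++ [c]) _ (by simpa using h)]
    simp only [not_or] at h3
    by_cases hc : c = '<'
    · subst hc
      simp [tokStep, scanTok, hs3, hs4]
    · have hmem : c ∉ ['<', '>', 's', '/'] := by simp [hc, h3.1, h3.2.1, h3.2.2]
      simp [tokStep, scanTok, hmem, h3.1, h3.2.1, h3.2.2]
  | case5 =>
    intro pre acc h
    simp [PySem.List.enumerate_nil, scanTok]

-- ===== VERDICT (by name: the statement is the Claim_ definition above) =====
theorem char_tokenizer_spec : Claim_equal_char_tokenizer := by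
  intro tweet _
  unfold Spec_char_tokenizer char_tokenizer char_tokenizer_alt
  have := fold_eq_scan tweet tweet.toList [] [] (by simp)
  simpa using this
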